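-- pv_equiv track=rewrite | github.com/ptrtonull-workshop/PianYuan | test/jsons.py | apart
-- ===== SOURCE A (Python) =====
-- def apart(srting, char):
--     tmp = ""
--     a = []
--     for i in srting:
--         if i == char:
--             a.append(tmp)
--             tmp = ""
--         else:
--             tmp += i
--     return a
-- ===== SOURCE B (Python) =====
-- def apart(srting, char):
--     # Two-pass: collect delimiter positions, then emit the slice before each one.
--     positions = [i for i, c in enumerate(srting) if c == char]
--     out = []
--     start = 0
--     for p in positions:
--         out.append(srting[start:p])
--         start = p + 1
--     return out
-- ===== Notes on version B (the rewrite author's own statement) =====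
-- stated objective: alternative
-- what changed: B first collects every delimiter position in one enumerate pass and then emits the slice between consecutive positions in a second pass over the positions, instead of A's single scan with a growing character accumulator; the trailing segment is dropped automatically because only delimiter positions produce output.
import Mathlib
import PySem

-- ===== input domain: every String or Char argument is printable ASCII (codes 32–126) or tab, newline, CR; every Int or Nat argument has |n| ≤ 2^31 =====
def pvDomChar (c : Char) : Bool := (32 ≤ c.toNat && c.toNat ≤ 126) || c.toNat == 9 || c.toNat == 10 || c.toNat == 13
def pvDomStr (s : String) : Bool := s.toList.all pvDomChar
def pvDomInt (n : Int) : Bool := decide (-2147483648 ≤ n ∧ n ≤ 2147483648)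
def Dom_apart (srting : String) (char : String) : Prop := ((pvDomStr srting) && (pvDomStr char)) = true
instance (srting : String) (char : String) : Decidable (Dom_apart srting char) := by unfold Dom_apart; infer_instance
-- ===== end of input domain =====

-- B collects delimiter positions first, then emits the slices between them (alternative decomposition, same cost).


-- ===== PORT A =====
-- single left-to-right scan: tmp is the pending segment, a the output list
def apart (srting : String) (char : String) : List String :=
  (srting.toList.foldl
    (fun (st : List Char × List String) (i : Char) =>
      if String.singleton i = char then ([], st.2 ++ [String.ofList st.1])
      else (st.1 ++ [i], st.2))
    ([], [])).2

-- ===== PORT B =====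
-- two passes: collect delimiter positions, then slice between consecutive positions
def apart_alt (srting : String) (char : String) : List String :=
  (((PySem.List.enumerate srting.toList 0).filter
      (fun pc => String.singleton pc.2 = char)).map Prod.fst).foldl
    (fun (st : List String × Int) (p : Int) =>
      (st.1 ++ [String.ofList (PySem.List.slice srting.toList (some st.2) (some p))], p + 1))
    ([], 0) |>.1

-- ===== PRECONDITION & SPEC =====
def Spec_apart (srting : String) (char : String) (out : List String) : Prop := out = apart_alt srting char
instance (srting : String) (char : String) (out : List String) : Decidable (Spec_apart srting char out) := by unfold Spec_apart; infer_instance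

-- ===== CLAIM (what is proved, stated in full; the proofs are below) =====
def Claim_equal_apart : Prop := ∀ (srting : String) (char : String), Dom_apart srting char → Spec_apart srting char (apart srting char)

-- ===== LEMMAS AND PROOFS =====

-- reference splitter: tmp is the pending segment
def pvRef (char : String) : List Char → List Char → List String
  | _, [] => []
  | tmp, c :: cs =>
    if String.singleton c = char then String.ofList tmp :: pvRef char [] cs
    else pvRef char (tmp ++ [c]) cs

lemma apart_fold (char : String) (cs : List Char) :
    ∀ (tmp : List Char) (acc : List String),
    (cs.foldl
      (fun (st : List Char × List String) (i : Char) =>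
        if String.singleton i = char then ([], st.2 ++ [String.ofList st.1])
        else (st.1 ++ [i], st.2))
      (tmp, acc)).2 = acc ++ pvRef char tmp cs := by
  induction cs with
  | nil => intro tmp acc; simp [pvRef]
  | cons c cs ih =>
    intro tmp acc
    by_cases h : String.singleton c = char <;>
      simp [pvRef, h, ih, List.append_assoc]

lemma bgen (char : String) (full : List Char) (cs : List Char) :
    ∀ (k : Int) (pre : List Char) (out : List String),
    0 ≤ k → full.drop k.toNat = pre ++ cs →
    ((((PySem.List.enumerate cs (k + pre.length)).filter
        (fun pc => String.singleton pc.2 = char)).map Prod.fst).foldl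
      (fun (st : List String × Int) (p : Int) =>
        (st.1 ++ [String.ofList (PySem.List.slice full (some st.2) (some p))], p + 1))
      (out, k)).1 = out ++ pvRef char pre cs := by
  induction cs with
  | nil => intro k pre out _ _; simp [PySem.List.enumerate_nil, pvRef]
  | cons c cs ih =>
    intro k pre out hk hdrop
    rw [PySem.List.enumerate_cons]
    by_cases h : String.singleton c = char
    · -- delimiter at position k + pre.length
      have hslice : PySem.List.slice full (some k) (some (k + pre.length)) = pre := by
        rw [PySem.List.slice_toNat _ hk (by omega)]
        have h1 : (k + (pre.length : Int)).toNat - k.toNat = pre.length := by omega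
        rw [h1, hdrop, List.take_left]
      have hdrop' : full.drop (k + pre.length + 1).toNat = cs := by
        have : (k + (pre.length : Int) + 1).toNat = k.toNat + (pre.length + 1) := by omega
        rw [this, ← List.drop_drop, hdrop]
        simp
      have := ih (k + pre.length + 1) [] (out ++ [String.ofList pre]) (by omega) (by simpa using hdrop')
      simp only [List.length_nil, Nat.cast_zero, add_zero] at this
      simp [h, List.foldl_cons, hslice, pvRef, this, List.append_assoc]
    · -- not a delimiter: extend the pending segment
      have hdrop' : full.drop k.toNat = (pre ++ [c]) ++ cs := by
        rw [hdrop]; simp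
      have := ih k (pre ++ [c]) out hk hdrop'
      simp only [List.length_append, List.length_cons, List.length_nil] at this
      have harith : k + ((pre.length : Int) + 1) = k + (pre.length + (0 + 1) : Nat) := by
        push_cast; ring
      simp [h, pvRef]
      rw [show k + (pre.length : Int) + 1 = k + ((pre.length : Int) + 1) by ring, harith] at *
      exact this

-- ===== VERDICT (by name: the statement is the Claim_ definition above) =====
theorem apart_spec : Claim_equal_apart := by
  intro srting char _
  unfold Spec_apart apart apart_alt
  rw [apart_fold char srting.toList [] []]
  have := bgen char srting.toList srting.toList 0 [] [] (le_refl 0) (by simp)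
  simp only [List.length_nil, Nat.cast_zero, add_zero, List.nil_append] at this ⊢
  exact this.symm
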